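-- pv_equiv track=rewrite | github.com/ny-11/osero | osero_GUIv2.py | hantei_sita
-- ===== SOURCE A (Python) =====
-- def hantei_sita(y,x,lst,turn,flag):
--     if lst[y][x] == ' ':
--         count = 0
--         if turn == 1:
--             if lst[y+1][x] == 'X':
--                 hamideru = 0
--                 while hamideru == 0:
--                     count += 1
--                     y += 1
--                     if lst[y][x] == 'O' or lst[y][x] == 'X':
--                         if lst[y][x] == 'O':
--                             while count > 0:
--                                 lst[y][x] = 'O'
--                                 count -= 1
--                                 hamideru = 1
--                                 y -= 1
--                                 flag = 1
--                     else:
--                         hamideru = 1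
--
--         else:
--             if lst[y+1][x] == 'O':
--                 hamideru = 0
--                 while hamideru == 0:
--                     y += 1
--                     count += 1
--                     if lst[y][x] == 'O' or lst[y][x] == 'X':
--                         if lst[y][x] == 'X':
--                             while count > 0:
--                                 lst[y][x] = 'X'
--                                 hamideru = 1
--                                 count -= 1
--                                 y -= 1
--                                 flag = 1
--                     else:
--                         hamideru = 1
--     return lst,flag
-- ===== SOURCE B (Python) =====
-- def hantei_sita(y, x, lst, turn, flag):
--     me, opp = ('O', 'X') if turn == 1 else ('X', 'O')
--     if lst[y][x] != ' ' or lst[y + 1][x] != opp: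
--         return lst, flag
--
--     def flip(yy):
--         # True iff the opponent run starting at yy ends at one of our pieces;
--         # flips the run cells on the way back up the recursion.
--         c = lst[yy][x]
--         if c == me:
--             return True
--         if c != opp:
--             return False
--         if flip(yy + 1):
--             lst[yy][x] = me
--             return True
--         return False
--
--     if flip(y + 1):
--         flag = 1
--     return lst, flag
-- ===== Notes on version B (the rewrite author's own statement) =====
-- stated objective: simpler
-- what changed: A's iterative while-loop with a step counter, a hamideru exit flag and a nested back-fill while-loop is replaced by a short recursive helper that answers 'does the run end at my piece?' and performs the flips on the unwind of the recursion, so no counter, no position list and no second loop exist.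
import Mathlib
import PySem

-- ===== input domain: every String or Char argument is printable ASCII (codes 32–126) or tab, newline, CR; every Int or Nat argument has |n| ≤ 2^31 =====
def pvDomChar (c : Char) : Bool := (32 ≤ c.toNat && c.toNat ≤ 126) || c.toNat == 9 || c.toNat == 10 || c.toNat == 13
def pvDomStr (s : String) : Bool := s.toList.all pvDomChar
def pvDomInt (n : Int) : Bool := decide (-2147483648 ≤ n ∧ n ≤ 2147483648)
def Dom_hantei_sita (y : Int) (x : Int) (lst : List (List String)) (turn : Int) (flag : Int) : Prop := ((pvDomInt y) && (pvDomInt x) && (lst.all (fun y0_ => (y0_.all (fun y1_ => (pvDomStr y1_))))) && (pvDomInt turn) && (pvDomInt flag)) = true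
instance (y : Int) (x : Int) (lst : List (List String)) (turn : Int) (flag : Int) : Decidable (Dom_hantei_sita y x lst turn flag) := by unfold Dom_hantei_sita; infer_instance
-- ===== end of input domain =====

-- B replaces A's iterative counter/back-fill while-loops by a recursive helper that flips the
-- run of opponent cells on the unwind of the recursion (objective: simpler). Both Pythons
-- mutate lst's rows in place; the writes coincide except for A's no-op re-write of the
-- terminating own-colour cell, so the final board and return value coincide.


-- ===== PORT A =====
-- lst[y][x] (two chained Python subscripts; none = IndexError)
def cellGet (lst : List (List String)) (y x : Int) : Option String :=
  (PySem.List.pyGet? lst y).bind (fun row => PySem.List.pyGet? row x)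

-- lst[y][x] = v (Python's in-place row assignment, functionally; on an out-of-range index
-- Python raises — excluded by Pre_ — and this total form leaves lst unchanged there)
def cellSet (lst : List (List String)) (y x : Int) (v : String) : List (List String) :=
  match PySem.List.pyIdx? lst.length y with
  | none => lst
  | some k => lst.modify k (fun row => PySem.List.pySetD row x v)

-- index bound used by the termination measures of the downward walks
theorem cellGet_lt {lst : List (List String)} {y x : Int} {v : String}
    (h : cellGet lst y x = some v) : y < (lst.length : Int) := by
  unfold cellGet at h
  cases hrow : PySem.List.pyGet? lst y with
  | none => rw [hrow] at h; simp at h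
  | some row =>
    by_cases hin : PySem.Raise.InRange lst.length y
    · exact hin.2
    · rw [(PySem.List.pyGet?_eq_none_iff lst y).2 hin] at hrow; simp at hrow

-- A's inner `while count > 0` back-fill loop (writes me at y, y-1, …; sets flag = 1 each pass)
def fillA (lst : List (List String)) (y x : Int) (count : Int) (me : String) (flag : Int) :
    List (List String) × Int :=
  if 0 < count then fillA (cellSet lst y x me) (y - 1) x (count - 1) me 1
  else (lst, flag)
termination_by count.toNat
decreasing_by omega

-- A's outer `while hamideru == 0` loop (count += 1; y += 1; examine lst[y][x])
def scanA (lst : List (List String)) (y x : Int) (count : Int) (me : String) (flag : Int) :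
    List (List String) × Int :=
  match h : cellGet lst (y + 1) x with
  | none => (lst, flag)        -- Python raises IndexError here; excluded by Pre_
  | some v =>
    if v = "O" ∨ v = "X" then
      if v = me then fillA lst (y + 1) x (count + 1) me flag
      else scanA lst (y + 1) x (count + 1) me flag
    else (lst, flag)
termination_by (lst.length - y).toNat
decreasing_by
  have := cellGet_lt h
  omega

def hantei_sita (y : Int) (x : Int) (lst : List (List String)) (turn : Int) (flag : Int) : List (List String) × Int :=
  match cellGet lst y x with
  | none => (lst, flag)        -- Python raises; excluded by Pre_
  | some c =>
    if c = " " then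
      if turn = 1 then
        match cellGet lst (y + 1) x with
        | none => (lst, flag)  -- Python raises; excluded by Pre_
        | some d => if d = "X" then scanA lst y x 0 "O" flag else (lst, flag)
      else
        match cellGet lst (y + 1) x with
        | none => (lst, flag)  -- Python raises; excluded by Pre_
        | some d => if d = "O" then scanA lst y x 0 "X" flag else (lst, flag)
    else (lst, flag)

-- ===== PORT B =====
-- B's recursive flip helper: Bool "run ends at my piece" plus the board after the
-- unwind-time flips (Python's `if c != opp: return False` is the final else branch here)
def flipB (lst : List (List String)) (x yy : Int) (me opp : String) : Bool × List (List String) :=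
  match h : cellGet lst yy x with
  | none => (false, lst)       -- Python raises; excluded by Pre_
  | some c =>
    if c = me then (true, lst)
    else if c = opp then
      let r := flipB lst x (yy + 1) me opp
      if r.1 then (true, cellSet r.2 yy x me) else (false, r.2)
    else (false, lst)
termination_by (lst.length - yy).toNat
decreasing_by
  have := cellGet_lt h
  omega

def hantei_sita_alt (y : Int) (x : Int) (lst : List (List String)) (turn : Int) (flag : Int) : List (List String) × Int :=
  let mo : String × String := if turn = 1 then ("O", "X") else ("X", "O")
  if cellGet lst y x ≠ some " " ∨ cellGet lst (y + 1) x ≠ some mo.2 then (lst, flag)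
  else
    let r := flipB lst x (y + 1) mo.1 mo.2
    if r.1 then (r.2, 1) else (r.2, flag)

-- ===== PRECONDITION & SPEC =====
-- Pre_ excludes exactly the inputs on which Python A raises IndexError: the reads lst[y][x]
-- and (when lst[y][x] is blank) lst[y+1][x] must succeed, and when a downward scan starts,
-- the first non-opponent cell straight down must be reached without indexing off the board.
def Pre_hantei_sita (y : Int) (x : Int) (lst : List (List String)) (turn : Int) (flag : Int) : Prop :=
  cellGet lst y x ≠ none ∧
  (cellGet lst y x = some " " →
    cellGet lst (y + 1) x ≠ none ∧
    (cellGet lst (y + 1) x = some (if turn = 1 then "X" else "O") →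
      ∃ n : Nat, n < (lst.length - y).toNat ∧
        (∀ m : Nat, m < n → cellGet lst (y + 1 + m) x = some (if turn = 1 then "X" else "O")) ∧
        cellGet lst (y + 1 + n) x ≠ none ∧
        cellGet lst (y + 1 + n) x ≠ some (if turn = 1 then "X" else "O")))
instance (y : Int) (x : Int) (lst : List (List String)) (turn : Int) (flag : Int) : Decidable (Pre_hantei_sita y x lst turn flag) := by unfold Pre_hantei_sita; infer_instance

def pvWitness_hantei_sita : Int × Int × List (List String) × Int × Int :=
  (0, 0, [[" "], ["X"], ["O"]], 1, 0)

def Spec_hantei_sita (y : Int) (x : Int) (lst : List (List String)) (turn : Int) (flag : Int) (out : List (List String) × Int) : Prop := out = hantei_sita_alt y x lst turn flag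
instance (y : Int) (x : Int) (lst : List (List String)) (turn : Int) (flag : Int) (out : List (List String) × Int) : Decidable (Spec_hantei_sita y x lst turn flag out) := by unfold Spec_hantei_sita; infer_instance

-- ===== CLAIM (what is proved, stated in full; the proofs are below) =====
def Claim_equal_hantei_sita : Prop := ∀ (y : Int) (x : Int) (lst : List (List String)) (turn : Int) (flag : Int), Dom_hantei_sita y x lst turn flag → Pre_hantei_sita y x lst turn flag → Spec_hantei_sita y x lst turn flag (hantei_sita y x lst turn flag)

-- ===== LEMMAS AND PROOFS =====

theorem pyIdx?_lt {n : Nat} {i : Int} {k : Nat} (h : PySem.List.pyIdx? n i = some k) : k < n := by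
  unfold PySem.List.pyIdx? at h
  split_ifs at h with h1 h2 h3 <;> simp at h <;> omega

theorem pyGet?_eq {α : Type} (xs : List α) (j : Int) :
    PySem.List.pyGet? xs j =
      (match PySem.List.pyIdx? xs.length j with
       | none => none
       | some k => xs[k]?) := by
  unfold PySem.List.pyGet?
  cases PySem.List.pyIdx? xs.length j <;> rfl

theorem pySetD_eq (row : List String) (x : Int) (v : String) :
    PySem.List.pySetD row x v =
      (match PySem.List.pyIdx? row.length x with
       | none => row
       | some k => row.set k v) := by
  unfold PySem.List.pySetD PySem.List.pySet?
  cases PySem.List.pyIdx? row.length x <;> rfl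

theorem set_of_getElem? {l : List String} {n : Nat} {a : String} (h : l[n]? = some a) :
    l.set n a = l := by
  have hlt : n < l.length := (List.getElem?_eq_some_iff.mp h).1
  have hv : l[n] = a := (List.getElem?_eq_some_iff.mp h).2
  rw [← hv]
  exact List.set_getElem_self hlt

theorem pyGet?_pySetD (row : List String) (x : Int) (v : String) :
    PySem.List.pyGet? (PySem.List.pySetD row x v) x = some v ∨
      PySem.List.pySetD row x v = row := by
  rw [pySetD_eq]
  cases hx : PySem.List.pyIdx? row.length x with
  | none => right; rfl
  | some kx =>
    left
    rw [pyGet?_eq]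
    have hk := pyIdx?_lt hx
    simp only [List.length_set, hx]
    exact List.getElem?_set_self hk

theorem pySetD_idem (row : List String) (x : Int) (v : String) :
    PySem.List.pySetD (PySem.List.pySetD row x v) x v = PySem.List.pySetD row x v := by
  cases hx : PySem.List.pyIdx? row.length x with
  | none =>
    have h : PySem.List.pySetD row x v = row := by rw [pySetD_eq, hx]
    rw [h, h]
  | some kx =>
    have h : PySem.List.pySetD row x v = row.set kx v := by rw [pySetD_eq, hx]
    rw [h, pySetD_eq]
    simp only [List.length_set, hx, List.set_set]

theorem pyGet?_modify (lst : List (List String)) (f : List String → List String) (k : Nat) (j : Int) :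
    PySem.List.pyGet? (lst.modify k f) j =
      (match PySem.List.pyIdx? lst.length j with
       | none => none
       | some kj => if k = kj then (lst[kj]?).map f else lst[kj]?) := by
  rw [pyGet?_eq, List.length_modify]
  cases hj : PySem.List.pyIdx? lst.length j with
  | none => rfl
  | some kj =>
    simp only [List.getElem?_modify]
    by_cases hk : k = kj
    · subst hk
      cases lst[k]? <;> simp
    · cases lst[kj]? <;> simp [hk]

-- get after set: either the original value or the written value
theorem cellGet_cellSet (lst : List (List String)) (i j x : Int) (v : String) :
    cellGet (cellSet lst i x v) j x = cellGet lst j x ∨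
    cellGet (cellSet lst i x v) j x = some v := by
  unfold cellSet
  cases hi : PySem.List.pyIdx? lst.length i with
  | none => left; rfl
  | some k =>
    unfold cellGet
    rw [pyGet?_modify, pyGet?_eq lst j]
    cases hj : PySem.List.pyIdx? lst.length j with
    | none => left; rfl
    | some kj =>
      by_cases hk : k = kj
      · simp only [if_pos hk]
        cases hl : lst[kj]? with
        | none => left; rfl
        | some row =>
          simp only [Option.map_some]
          rcases pyGet?_pySetD row x v with h | h
          · right; simpa using h
          · left; simp [h]
      · simp only [if_neg hk]; left; trivial

-- writing back the value already there changes nothing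
theorem cellSet_noop {lst : List (List String)} {i x : Int} {v : String}
    (h : cellGet lst i x = some v) : cellSet lst i x v = lst := by
  unfold cellGet at h
  rw [pyGet?_eq lst i] at h
  unfold cellSet
  cases hi : PySem.List.pyIdx? lst.length i with
  | none => rfl
  | some k =>
    rw [hi] at h
    have h2 : lst[k]?.bind (fun row => PySem.List.pyGet? row x) = some v := h
    clear h
    show lst.modify k (fun row => PySem.List.pySetD row x v) = lst
    cases hl : lst[k]? with
    | none => rw [hl] at h2; simp at h2
    | some row =>
      rw [hl] at h2
      have h : PySem.List.pyGet? row x = some v := h2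
      rw [pyGet?_eq row x] at h
      cases hx : PySem.List.pyIdx? row.length x with
      | none => rw [hx] at h; simp at h
      | some kx =>
        rw [hx] at h
        have hrow : PySem.List.pySetD row x v = row := by
          rw [pySetD_eq, hx]
          exact set_of_getElem? h
        apply List.ext_getElem?
        intro m
        rw [List.getElem?_modify]
        cases hm : lst[m]? with
        | none => rfl
        | some r =>
          by_cases hkm : k = m
          · subst hkm; rw [hl] at hm; cases hm; simp [hrow]
          · simp [hkm]

theorem modify_comm_idem (f : List String → List String)
    (hf : ∀ r, f (f r) = f r) (l : List (List String)) (i j : Nat) :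
    (l.modify i f).modify j f = (l.modify j f).modify i f := by
  apply List.ext_getElem?
  intro m
  simp only [List.getElem?_modify]
  cases l[m]? with
  | none => rfl
  | some r =>
    by_cases hi : i = m <;> by_cases hj : j = m <;> simp [hi, hj, hf]

-- two writes of the same value commute
theorem cellSet_comm (lst : List (List String)) (a b x : Int) (v : String) :
    cellSet (cellSet lst a x v) b x v = cellSet (cellSet lst b x v) a x v := by
  have hf : ∀ r : List String,
      PySem.List.pySetD (PySem.List.pySetD r x v) x v = PySem.List.pySetD r x v :=
    fun r => pySetD_idem r x v
  unfold cellSet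
  cases ha : PySem.List.pyIdx? lst.length a <;> cases hb : PySem.List.pyIdx? lst.length b <;>
    simp only [ha, hb, List.length_modify] <;> try rfl
  exact modify_comm_idem _ hf lst _ _

theorem foldl_cellSet_comm (x : Int) (v : String) :
    ∀ (js : List Int) (lst : List (List String)) (a : Int),
      js.foldl (fun l j => cellSet l j x v) (cellSet lst a x v) =
      cellSet (js.foldl (fun l j => cellSet l j x v) lst) a x v := by
  intro js
  induction js with
  | nil => intro lst a; simp
  | cons b js ih =>
    intro lst a
    simp only [List.foldl_cons]
    rw [cellSet_comm, ih]

theorem cellGet_foldl (x : Int) (v : String) :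
    ∀ (js : List Int) (lst : List (List String)) (j : Int),
      cellGet lst j x = some v →
      cellGet (js.foldl (fun l i => cellSet l i x v) lst) j x = some v := by
  intro js
  induction js with
  | nil => intro lst j h; simpa using h
  | cons b js ih =>
    intro lst j h
    simp only [List.foldl_cons]
    apply ih
    rcases cellGet_cellSet lst b j x v with h' | h'
    · rw [h']; exact h
    · exact h'

-- B's recursion on a run of n opponent cells followed by cell value v ≠ opp:
-- true plus an ascending same-value fold when v = me, false and the untouched board otherwise
theorem flipB_run (x : Int) (me opp : String) (hne : opp ≠ me) :
    ∀ (n : Nat) (lst : List (List String)) (s : Int) (v : String),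
      (∀ m : Nat, m < n → cellGet lst (s + m) x = some opp) →
      cellGet lst (s + n) x = some v → v ≠ opp →
      flipB lst x s me opp =
        (if v = me then
          (true, ((List.range n).map (fun m : Nat => s + (m : Int))).foldl
            (fun l j => cellSet l j x me) lst)
        else (false, lst)) := by
  intro n
  induction n with
  | zero =>
    intro lst s v _ h2 h3
    have h2' : cellGet lst s x = some v := by simpa using h2
    rw [flipB]
    split
    · rename_i heq; rw [h2'] at heq; cases heq
    · rename_i c heq
      rw [h2'] at heq
      injection heq with hv
      subst hv
      by_cases hm : v = me
      · rw [if_pos hm, if_pos hm]; simp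
      · rw [if_neg hm, if_neg (by exact h3), if_neg hm]
  | succ n ih =>
    intro lst s v h1 h2 h3
    have h0 : cellGet lst s x = some opp := by simpa using h1 0 (Nat.succ_pos n)
    rw [flipB]
    split
    · rename_i heq; rw [h0] at heq; cases heq
    · rename_i c heq
      rw [h0] at heq
      injection heq with hv
      subst hv
      rw [if_neg hne, if_pos rfl]
      rw [ih lst (s + 1) v ?run ?term h3]
      case run =>
        intro m hm
        have h := h1 (m + 1) (by omega)
        have e : s + ((m : Int) + 1) = s + 1 + m := by ring
        push_cast at h
        rw [e] at h
        exact h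
      case term =>
        have e : s + ((n : Int) + 1) = s + 1 + n := by ring
        push_cast at h2
        rw [e] at h2
        exact h2
      by_cases hm : v = me
      · rw [if_pos hm]
        simp only [if_pos hm]
        rw [show List.range (n + 1) = List.range (n + 1) from rfl]
        have hmap : (List.range (n + 1)).map (fun m : Nat => s + (m : Int)) =
            s :: (List.range n).map (fun m : Nat => s + 1 + (m : Int)) := by
          rw [List.range_succ_eq_map, List.map_cons, List.map_map]
          simp only [Nat.cast_zero, add_zero, Function.comp_def]
          congr 1
          apply List.map_congr_left
          intro m _
          push_cast
          ring
        rw [hmap]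
        simp only [List.foldl_cons]
        rw [foldl_cellSet_comm]
        simp
      · rw [if_neg hm]
        simp only [if_neg hm]
        simp

-- A's back-fill of count = n+1 cells ending (top) at t equals an ascending fold
theorem fillA_run (x : Int) (me : String) :
    ∀ (n : Nat) (lst : List (List String)) (t : Int) (flag : Int),
      fillA lst t x ((n : Int) + 1) me flag =
        (((List.range (n + 1)).map (fun m : Nat => t - n + (m : Int))).foldl
          (fun l j => cellSet l j x me) lst, 1) := by
  intro n
  induction n with
  | zero =>
    intro lst t flag
    rw [fillA, if_pos (by norm_num)]
    rw [fillA, if_neg (by norm_num)]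
    simp
  | succ n ih =>
    intro lst t flag
    rw [fillA, if_pos (by push_cast; omega)]
    have e : ((n + 1 : Nat) : Int) + 1 - 1 = (n : Int) + 1 := by push_cast; ring
    rw [e, ih]
    rw [foldl_cellSet_comm]
    rw [show List.range (n + 1 + 1) = List.range (n + 1) ++ [n + 1] from List.range_succ]
    rw [List.map_append, List.foldl_append]
    simp only [List.map_cons, List.map_nil, List.foldl_cons, List.foldl_nil]
    have e2 : t - ((n + 1 : Nat) : Int) + ((n + 1 : Nat) : Int) = t := by push_cast; ring
    have e3 : (List.range (n + 1)).map (fun m : Nat => t - 1 - (n : Int) + (m : Int)) =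
        (List.range (n + 1)).map (fun m : Nat => t - ((n + 1 : Nat) : Int) + (m : Int)) := by
      apply List.map_congr_left
      intro m _
      push_cast
      ring
    rw [e2, e3]

-- A's outer scan on a run of n opponent cells followed by cell value v ≠ opp
theorem scanA_run (x : Int) (me opp : String)
    (hpair : (me = "O" ∧ opp = "X") ∨ (me = "X" ∧ opp = "O")) :
    ∀ (n : Nat) (lst : List (List String)) (y : Int) (count : Int) (flag : Int) (v : String),
      (∀ m : Nat, m < n → cellGet lst (y + 1 + m) x = some opp) →
      cellGet lst (y + 1 + n) x = some v → v ≠ opp →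
      scanA lst y x count me flag =
        (if v = me then fillA lst (y + 1 + n) x (count + 1 + n) me flag else (lst, flag)) := by
  intro n
  induction n with
  | zero =>
    intro lst y count flag v h1 h2 h3
    have h2' : cellGet lst (y + 1) x = some v := by simpa using h2
    rw [scanA]
    split
    · rename_i heq
      rw [h2'] at heq
      cases heq
    · rename_i v' heq
      rw [h2'] at heq
      injection heq with hv
      subst hv
      by_cases hme : v = me
      · have hOX : v = "O" ∨ v = "X" := by
          rcases hpair with ⟨hm, _⟩ | ⟨hm, _⟩ <;> subst hm <;> [exact Or.inl hme; exact Or.inr hme]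
        rw [if_pos hOX, if_pos hme, if_pos hme]
        simp
      · have hOX : ¬ (v = "O" ∨ v = "X") := by
          rcases hpair with ⟨hm, ho⟩ | ⟨hm, ho⟩ <;> subst hm <;> subst ho <;>
            rintro (h | h) <;> first | exact hme h | exact h3 h
        rw [if_neg hOX, if_neg hme]
  | succ n ih =>
    intro lst y count flag v h1 h2 h3
    have h0 : cellGet lst (y + 1) x = some opp := by simpa using h1 0 (Nat.succ_pos n)
    rw [scanA]
    split
    · rename_i heq
      rw [h0] at heq
      cases heq
    · rename_i v' heq
      rw [h0] at heq
      injection heq with hv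
      subst hv
      have hOX : opp = "O" ∨ opp = "X" := by
        rcases hpair with ⟨_, ho⟩ | ⟨_, ho⟩ <;> subst ho <;> simp
      have hne : ¬ (opp = me) := by
        rcases hpair with ⟨hm, ho⟩ | ⟨hm, ho⟩ <;> subst hm <;> subst ho <;> decide
      rw [if_pos hOX, if_neg hne]
      rw [ih lst (y + 1) (count + 1) flag v ?run ?term h3]
      case run =>
        intro m hm
        have h := h1 (m + 1) (by omega)
        have e : y + 1 + ((m : Int) + 1) = y + 1 + 1 + m := by ring
        push_cast at h
        rw [e] at h
        exact h
      case term =>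
        have e : y + 1 + ((n : Int) + 1) = y + 1 + 1 + n := by ring
        push_cast at h2
        rw [e] at h2
        exact h2
      have e1 : y + 1 + 1 + (n : Int) = y + 1 + ((n + 1 : Nat) : Int) := by push_cast; ring
      have e2 : count + 1 + 1 + (n : Int) = count + 1 + ((n + 1 : Nat) : Int) := by push_cast; ring
      rw [e1, e2]

-- the flipping branch: A's scan-and-back-fill equals B's recursive flip-on-unwind
theorem branch_eq (x : Int) (me opp : String)
    (hpair : (me = "O" ∧ opp = "X") ∨ (me = "X" ∧ opp = "O"))
    (lst : List (List String)) (y flag : Int) (n : Nat)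
    (hrun : ∀ m : Nat, m < n → cellGet lst (y + 1 + m) x = some opp)
    (htn : cellGet lst (y + 1 + n) x ≠ none)
    (hto : cellGet lst (y + 1 + n) x ≠ some opp) :
    scanA lst y x 0 me flag =
      (if (flipB lst x (y + 1) me opp).1 then ((flipB lst x (y + 1) me opp).2, 1)
       else ((flipB lst x (y + 1) me opp).2, flag)) := by
  obtain ⟨v, hv⟩ := Option.ne_none_iff_exists'.mp htn
  have hvo : v ≠ opp := by intro h; exact hto (by rw [hv, h])
  have hne : opp ≠ me := by
    rcases hpair with ⟨hm, ho⟩ | ⟨hm, ho⟩ <;> subst hm <;> subst ho <;> decide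
  rw [flipB_run x me opp hne n lst (y + 1) v hrun hv hvo]
  rw [scanA_run x me opp hpair n lst y 0 flag v hrun hv hvo]
  by_cases hm : v = me
  · rw [if_pos hm, if_pos hm]
    simp only
    rw [show (0 : Int) + 1 + (n : Int) = (n : Int) + 1 from by ring]
    rw [fillA_run x me n lst (y + 1 + n) flag]
    rw [show List.range (n + 1) = List.range n ++ [n] from List.range_succ]
    rw [List.map_append, List.foldl_append]
    simp only [List.map_cons, List.map_nil, List.foldl_cons, List.foldl_nil]
    have e2 : (List.range n).map (fun m : Nat => y + 1 + (n : Int) - (n : Int) + (m : Int)) =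
        (List.range n).map (fun m : Nat => y + 1 + (m : Int)) := by
      apply List.map_congr_left
      intro m _
      ring
    rw [e2]
    rw [show y + 1 + (n : Int) - (n : Int) + (n : Int) = y + 1 + (n : Int) from by ring]
    have hgm : cellGet (((List.range n).map (fun m : Nat => y + 1 + (m : Int))).foldl
        (fun l i => cellSet l i x me) lst) (y + 1 + (n : Int)) x = some me := by
      apply cellGet_foldl
      rw [hv, hm]
    rw [cellSet_noop hgm]
    simp
  · rw [if_neg hm, if_neg hm]
    simp

-- ===== VERDICT (by name: the statement is the Claim_ definition above) =====
theorem hantei_sita_spec : Claim_equal_hantei_sita := by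
  unfold Claim_equal_hantei_sita
  intro y x lst turn flag _ hpre
  unfold Spec_hantei_sita
  obtain ⟨hy, hrest⟩ := hpre
  unfold hantei_sita
  split
  · rename_i heq; exact absurd heq hy
  · rename_i c heq
    by_cases hsp : c = " "
    · rw [hsp] at heq
      rw [if_pos hsp]
      obtain ⟨h1, hrest2⟩ := hrest heq
      by_cases hturn : turn = 1
      · subst hturn
        rw [if_pos rfl]
        split
        · rename_i heq2; exact absurd heq2 h1
        · rename_i d heq2
          by_cases hd : d = "X"
          · rw [if_pos hd]
            rw [hd] at heq2
            obtain ⟨n, _, hrun, htn, hto⟩ := hrest2 (by simpa using heq2)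
            rw [branch_eq x "O" "X" (Or.inl ⟨rfl, rfl⟩) lst y flag n hrun htn hto]
            simp only [hantei_sita_alt]
            simp [heq, heq2]
          · rw [if_neg hd]
            simp only [hantei_sita_alt]
            simp [heq, heq2, hd]
      · rw [if_neg hturn]
        split
        · rename_i heq2; exact absurd heq2 h1
        · rename_i d heq2
          by_cases hd : d = "O"
          · rw [if_pos hd]
            rw [hd] at heq2
            have hopp : (if turn = 1 then "X" else "O") = "O" := if_neg hturn
            obtain ⟨n, _, hrun, htn, hto⟩ := hrest2 (by rw [heq2, hopp])
            simp only [hopp] at hrun htn hto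
            rw [branch_eq x "X" "O" (Or.inr ⟨rfl, rfl⟩) lst y flag n hrun htn hto]
            simp only [hantei_sita_alt]
            simp [heq, heq2, hturn]
          · rw [if_neg hd]
            simp only [hantei_sita_alt]
            simp [heq, heq2, hd, hturn]
    · rw [if_neg hsp]
      simp only [hantei_sita_alt]
      have hne : cellGet lst y x ≠ some " " := by rw [heq]; simp [hsp]
      simp [hne]
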